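-- pv_equiv track=rewrite | github.com/usnistgov/hg2-t2t-benchmark-dev | pipelines/bench-compare/workflow/scripts/python/vcf_to_bed.py | trim_ref
-- ===== SOURCE A (Python) =====
-- def trim_ref(start, ref, truth, query1, query2):
--     n = 0
--     for r in ref:
--         try:
--             if truth != "." and truth[n] != r:
--                 break
--             if query1 != "." and query1[n] != r:
--                 break
--             if query2 != "." and query2[n] != r:
--                 break
--         except IndexError:
--             break
--         n = n + 1
--     if truth != ".":
--         truth = truth[n:]
--     if query1 != ".":
--         query1 = query1[n:]
--     if query2 != ".":
--         query2 = query2[n:]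
--     return (start + n, ref[n:], truth, query1, query2)
-- ===== SOURCE B (Python) =====
-- def trim_ref(start, ref, truth, query1, query2):
--     # Binary search on the (monotone) shared-prefix length instead of a
--     # character-by-character scan: whole-slice comparisons decide each probe.
--     active = [s for s in (truth, query1, query2) if s != "."]
--
--     def ok(k):
--         return all(len(s) >= k and s[:k] == ref[:k] for s in active)
--
--     lo, hi = 0, len(ref)
--     while lo < hi:
--         mid = (lo + hi + 1) // 2
--         if ok(mid):
--             lo = mid
--         else:
--             hi = mid - 1
--     n = lo
--     return (
--         start + n,
--         ref[n:],
--         truth if truth == "." else truth[n:],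
--         query1 if query1 == "." else query1[n:],
--         query2 if query2 == "." else query2[n:],
--     )
-- ===== Notes on version B (the rewrite author's own statement) =====
-- stated objective: alternative
-- what changed: B replaces A's left-to-right character scan (index counter with try/except IndexError) by a binary search over the candidate prefix length: the predicate 'all active strings have ref[:k] as a prefix' is monotone in k, so B probes O(log n) lengths with whole-slice comparisons instead of walking characters one by one.
import Mathlib
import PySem

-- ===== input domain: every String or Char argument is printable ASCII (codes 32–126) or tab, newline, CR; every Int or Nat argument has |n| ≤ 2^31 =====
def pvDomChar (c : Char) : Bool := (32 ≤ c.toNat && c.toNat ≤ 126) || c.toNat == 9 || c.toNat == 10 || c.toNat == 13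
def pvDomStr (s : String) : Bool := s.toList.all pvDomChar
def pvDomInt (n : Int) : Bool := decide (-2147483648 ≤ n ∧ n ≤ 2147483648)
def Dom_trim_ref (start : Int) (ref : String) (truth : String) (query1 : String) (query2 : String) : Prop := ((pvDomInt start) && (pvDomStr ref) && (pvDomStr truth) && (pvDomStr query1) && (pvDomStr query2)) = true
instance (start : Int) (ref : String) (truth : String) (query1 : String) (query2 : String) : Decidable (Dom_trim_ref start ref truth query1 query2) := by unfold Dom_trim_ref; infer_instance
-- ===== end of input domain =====

-- B finds the common prefix length by binary search on the monotone predicate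
-- "ref[:k] is a prefix of every active string" instead of A's character-by-character
-- scan; objective: alternative algorithm. Return values only (no mutation in either).

-- ===== PORT A =====
-- one guarded comparison of A's loop body: `s != "." and s[n] != r` with the
-- IndexError of s[n] caught as break; returns false exactly when A breaks on this string
def trimRefCheck (s : String) (n : Nat) (r : Char) : Bool :=
  if s ≠ "." then
    match PySem.List.pyGet? s.toList (n : Int) with
    | none => false          -- IndexError → break
    | some c => c == r
  else true

-- `for r in ref: … n = n + 1` with the three break conditions
def trimRefLoop (truth query1 query2 : String) : List Char → Nat → Nat
  | [], n => n
  | r :: rs, n =>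
    if trimRefCheck truth n r && trimRefCheck query1 n r && trimRefCheck query2 n r then
      trimRefLoop truth query1 query2 rs (n + 1)
    else n

def trim_ref (start : Int) (ref : String) (truth : String) (query1 : String) (query2 : String) : Int × String × String × String × String :=
  let n := trimRefLoop truth query1 query2 ref.toList 0
  let truth' := if truth ≠ "." then String.ofList (PySem.List.slice truth.toList (some (n : Int)) none) else truth
  let query1' := if query1 ≠ "." then String.ofList (PySem.List.slice query1.toList (some (n : Int)) none) else query1
  let query2' := if query2 ≠ "." then String.ofList (PySem.List.slice query2.toList (some (n : Int)) none) else query2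
  (start + n, String.ofList (PySem.List.slice ref.toList (some (n : Int)) none), truth', query1', query2')

-- ===== PORT B =====
-- `len(s) >= k and s[:k] == ref[:k]` — one conjunct of Source B's ok(k)
def trimAltOkOne (refL s : List Char) (k : Nat) : Bool :=
  decide (k ≤ s.length) && (PySem.List.slice s none (some (k : Int)) == PySem.List.slice refL none (some (k : Int)))

-- `ok(k) = all(len(s) >= k and s[:k] == ref[:k] for s in active)`
def trimAltOk (refL : List Char) (active : List (List Char)) (k : Nat) : Bool :=
  active.all (fun s => trimAltOkOne refL s k)

-- `while lo < hi: mid = (lo+hi+1)//2; lo = mid if ok(mid) else hi = mid-1`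
-- (lo, hi are nonnegative throughout, so Nat division `/` is exactly Python's `//` here)
def trimAltBsearchGo (p : Nat → Bool) : Nat → Nat → Nat → Nat
  | 0, lo, _hi => lo
  | fuel + 1, lo, hi =>
    if lo < hi then
      if p ((lo + hi + 1) / 2) then trimAltBsearchGo p fuel ((lo + hi + 1) / 2) hi
      else trimAltBsearchGo p fuel lo ((lo + hi + 1) / 2 - 1)
    else lo

-- the loop terminates because hi - lo strictly decreases; `hi - lo` steps always suffice
def trimAltBsearch (p : Nat → Bool) (lo hi : Nat) : Nat := trimAltBsearchGo p (hi - lo) lo hi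

def trim_ref_alt (start : Int) (ref : String) (truth : String) (query1 : String) (query2 : String) : Int × String × String × String × String :=
  let active := ([truth, query1, query2].filter (fun s => s ≠ ".")).map String.toList
  let n := trimAltBsearch (trimAltOk ref.toList active) 0 ref.toList.length
  (start + n,
   String.ofList (PySem.List.slice ref.toList (some (n : Int)) none),
   if truth = "." then truth else String.ofList (PySem.List.slice truth.toList (some (n : Int)) none),
   if query1 = "." then query1 else String.ofList (PySem.List.slice query1.toList (some (n : Int)) none),
   if query2 = "." then query2 else String.ofList (PySem.List.slice query2.toList (some (n : Int)) none))

-- ===== PRECONDITION & SPEC =====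
def Spec_trim_ref (start : Int) (ref : String) (truth : String) (query1 : String) (query2 : String) (out : Int × String × String × String × String) : Prop := out = trim_ref_alt start ref truth query1 query2
instance (start : Int) (ref : String) (truth : String) (query1 : String) (query2 : String) (out : Int × String × String × String × String) : Decidable (Spec_trim_ref start ref truth query1 query2 out) := by unfold Spec_trim_ref; infer_instance

-- ===== CLAIM (what is proved, stated in full; the proofs are below) =====
def Claim_equal_trim_ref : Prop := ∀ (start : Int) (ref : String) (truth : String) (query1 : String) (query2 : String), Dom_trim_ref start ref truth query1 query2 → Spec_trim_ref start ref truth query1 query2 (trim_ref start ref truth query1 query2)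

-- ===== LEMMAS AND PROOFS =====

-- trimAltOkOne in take-form
theorem trimAltOkOne_eq (refL s : List Char) (k : Nat) :
    trimAltOkOne refL s k = (decide (k ≤ s.length) && (s.take k == refL.take k)) := by
  simp [trimAltOkOne, PySem.List.slice_to_natCast]

-- the predicate is monotone (downward closed): a shorter prefix also matches
theorem trimAltOk_mono (refL : List Char) (active : List (List Char)) {j k : Nat}
    (hjk : j ≤ k) (hk : trimAltOk refL active k = true) : trimAltOk refL active j = true := by
  simp only [trimAltOk, List.all_eq_true, trimAltOkOne_eq] at hk ⊢
  intro s hs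
  obtain ⟨hlen, htake⟩ := by simpa using hk s hs
  have h1 : j ≤ s.length := le_trans hjk hlen
  have h2 : s.take j = refL.take j := by
    have := congrArg (List.take j) htake
    simpa [List.take_take, Nat.min_eq_left hjk] using this
  simp [h1, h2]

-- correctness of the binary search for any monotone predicate
theorem trimAltBsearchGo_spec (p : Nat → Bool)
    (mono : ∀ {j k : Nat}, j ≤ k → p k = true → p j = true) :
    ∀ (fuel lo hi : Nat), hi - lo ≤ fuel → lo ≤ hi → p lo = true →
      p (trimAltBsearchGo p fuel lo hi) = true ∧ trimAltBsearchGo p fuel lo hi ≤ hi ∧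
        (∀ k, k ≤ hi → p k = true → k ≤ trimAltBsearchGo p fuel lo hi) := by
  intro fuel
  induction fuel with
  | zero =>
    intro lo hi hf hle hlo
    simp only [trimAltBsearchGo]
    exact ⟨hlo, hle, fun k hk _ => by omega⟩
  | succ fuel ih =>
    intro lo hi hf hle hlo
    rw [trimAltBsearchGo]
    by_cases h : lo < hi
    · rw [if_pos h]
      by_cases hp : p ((lo + hi + 1) / 2) = true
      · rw [if_pos hp]
        exact ih ((lo + hi + 1) / 2) hi (by omega) (by omega) hp
      · rw [if_neg hp]
        obtain ⟨h1, h2, h3⟩ := ih lo ((lo + hi + 1) / 2 - 1) (by omega) (by omega) hlo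
        refine ⟨h1, by omega, ?_⟩
        intro k hk hpk
        by_cases hkm : k ≤ (lo + hi + 1) / 2 - 1
        · exact h3 k hkm hpk
        · exact absurd (mono (by omega) hpk) hp
    · rw [if_neg h]
      exact ⟨hlo, hle, fun k hk _ => by omega⟩

-- one step of A's check, per string, equals extending the matched prefix by one
theorem trimStepOne (refL s : List Char) (m : Nat) (c : Char) (hc : refL[m]? = some c)
    (hlen : m ≤ s.length) (htake : s.take m = refL.take m) :
    (match s[m]? with | none => false | some d => d == c)
      = (decide (m + 1 ≤ s.length) && (s.take (m + 1) == refL.take (m + 1))) := by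
  cases hsm : s[m]? with
  | none =>
    have hle : s.length ≤ m := List.getElem?_eq_none_iff.mp hsm
    simp [show ¬ (m + 1 ≤ s.length) from by omega]
  | some d =>
    have hm : m < s.length := (List.getElem?_eq_some_iff.mp hsm).1
    rw [Bool.eq_iff_iff]
    simp [List.take_add_one, hsm, hc, htake, Nat.succ_le_of_lt hm]

-- A's three-way break condition at position m equals B's predicate at m+1,
-- generalised over any list of strings (given the prefix up to m already matches)
theorem trimCond_eq (refL : List Char) (c : Char) (m : Nat) (hc : refL[m]? = some c) :
    ∀ (ss : List String),
      trimAltOk refL ((ss.filter (fun s => s ≠ ".")).map String.toList) m = true →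
      (ss.all fun s => trimRefCheck s m c)
        = trimAltOk refL ((ss.filter (fun s => s ≠ ".")).map String.toList) (m + 1) := by
  intro ss
  induction ss with
  | nil => intro _; simp [trimAltOk]
  | cons s ss ih =>
    intro hok
    by_cases hdot : s = "."
    · have hch : trimRefCheck s m c = true := by simp [trimRefCheck, hdot]
      rw [List.all_cons, hch, Bool.true_and,
        List.filter_cons_of_neg (by simp [hdot])] at *
      exact ih hok
    · rw [List.filter_cons_of_pos (by simp [hdot]), List.map_cons] at hok ⊢
      have hok' := hok
      simp only [trimAltOk, List.all_cons, Bool.and_eq_true] at hok'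
      obtain ⟨h1, h2'⟩ := hok'
      have h2 : trimAltOk refL ((ss.filter (fun s => s ≠ ".")).map String.toList) m = true := h2'
      obtain ⟨hlen, htake⟩ := by simpa [trimAltOkOne_eq] using h1
      have hch : trimRefCheck s m c = trimAltOkOne refL s.toList (m + 1) := by
        rw [trimRefCheck, if_pos (by simpa using hdot), PySem.List.pyGet?_natCast,
          trimAltOkOne_eq]
        exact trimStepOne refL s.toList m c hc hlen htake
      rw [List.all_cons, hch, ih h2]
      simp [trimAltOk]

-- A's counted scan from offset m yields a maximal matching prefix length
theorem trimRefLoop_spec (truth query1 query2 ref : String) :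
    ∀ (rs : List Char) (m : Nat), rs = ref.toList.drop m → m ≤ ref.toList.length →
      trimAltOk ref.toList (([truth, query1, query2].filter (fun s => s ≠ ".")).map String.toList) m = true →
      m ≤ trimRefLoop truth query1 query2 rs m ∧
      trimRefLoop truth query1 query2 rs m ≤ ref.toList.length ∧
      trimAltOk ref.toList (([truth, query1, query2].filter (fun s => s ≠ ".")).map String.toList)
        (trimRefLoop truth query1 query2 rs m) = true ∧
      (trimRefLoop truth query1 query2 rs m = ref.toList.length ∨
       trimAltOk ref.toList (([truth, query1, query2].filter (fun s => s ≠ ".")).map String.toList)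
         (trimRefLoop truth query1 query2 rs m + 1) = false) := by
  intro rs
  induction rs with
  | nil =>
    intro m hdrop hm hok
    have hlen := congrArg List.length hdrop
    rw [List.length_drop, List.length_nil] at hlen
    simp only [trimRefLoop]
    exact ⟨le_refl m, hm, hok, Or.inl (by omega)⟩
  | cons c cs ih =>
    intro m hdrop hm hok
    have hc : ref.toList[m]? = some c := by
      have h0 : (ref.toList.drop m)[0]? = some c := by rw [← hdrop]; rfl
      simpa using h0
    have hcs : cs = ref.toList.drop (m + 1) := by
      have := congrArg List.tail hdrop
      simpa [List.tail_drop] using this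
    have hmlt : m < ref.toList.length := (List.getElem?_eq_some_iff.mp hc).1
    have hcond := trimCond_eq ref.toList c m hc [truth, query1, query2] hok
    simp only [List.all_cons, List.all_nil, Bool.and_true] at hcond
    rw [← Bool.and_assoc] at hcond
    rw [trimRefLoop]
    by_cases hstep :
        trimAltOk ref.toList (([truth, query1, query2].filter (fun s => s ≠ ".")).map String.toList) (m + 1) = true
    · rw [if_pos (by rw [hcond]; exact hstep)]
      obtain ⟨a1, a2, a3, a4⟩ := ih (m + 1) hcs (by omega) hstep
      exact ⟨by omega, a2, a3, a4⟩
    · rw [if_neg (by rw [hcond]; simpa using hstep)]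
      exact ⟨le_refl m, by omega, hok, Or.inr (by simpa using hstep)⟩

-- the two prefix lengths coincide
theorem trim_n_eq (truth query1 query2 ref : String) :
    trimRefLoop truth query1 query2 ref.toList 0
      = trimAltBsearch
          (trimAltOk ref.toList (([truth, query1, query2].filter (fun s => s ≠ ".")).map String.toList))
          0 ref.toList.length := by
  set act := ([truth, query1, query2].filter (fun s => s ≠ ".")).map String.toList with hact
  have h0 : trimAltOk ref.toList act 0 = true := by
    simp [trimAltOk, trimAltOkOne_eq]
  obtain ⟨a1, a2, a3, a4⟩ :=
    trimRefLoop_spec truth query1 query2 ref ref.toList 0 (by simp) (by omega) h0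
  obtain ⟨b1, b2, b3⟩ :=
    trimAltBsearchGo_spec (trimAltOk ref.toList act)
      (fun hjk hk => trimAltOk_mono ref.toList act hjk hk)
      (ref.toList.length - 0) 0 ref.toList.length (le_refl _) (by omega) h0
  set N := trimRefLoop truth query1 query2 ref.toList 0
  have hMdef : trimAltBsearch (trimAltOk ref.toList act) 0 ref.toList.length
      = trimAltBsearchGo (trimAltOk ref.toList act) (ref.toList.length - 0) 0 ref.toList.length := rfl
  rw [hMdef]
  set M := trimAltBsearchGo (trimAltOk ref.toList act) (ref.toList.length - 0) 0 ref.toList.length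
  have hNM : N ≤ M := b3 N a2 a3
  have hMN : M ≤ N := by
    rcases a4 with heq | hfail
    · omega
    · by_contra hlt
      have : trimAltOk ref.toList act (N + 1) = true :=
        trimAltOk_mono ref.toList act (by omega) b1
      rw [hfail] at this
      exact absurd this (by simp)
  omega

-- ===== VERDICT (by name: the statement is the Claim_ definition above) =====
theorem trim_ref_spec : Claim_equal_trim_ref := by
  intro start ref truth query1 query2 _
  unfold Spec_trim_ref trim_ref trim_ref_alt
  rw [trim_n_eq truth query1 query2 ref]
  by_cases h1 : truth = "." <;> by_cases h2 : query1 = "." <;> by_cases h3 : query2 = "." <;>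
    simp [h1, h2, h3]
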